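-- pv_equiv track=rewrite | github.com/xz-dev/distrobox-plus | src/distrobox_boost/utils/parsing.py | parse_multiline_value
-- ===== SOURCE A (Python) =====
-- def parse_multiline_value(value: str) -> list[str]:
--     """Parse a multiline or space-separated value into a list.
--
--     Handles both:
--     - Space-separated: "git curl wget"
--     - Multiline with quotes: "first command" "second command"
--     - Escaped quotes within quoted strings: "echo \\"hello\\""
--
--     Args:
--         value: Raw value string from INI file.
--
--     Returns:
--         List of individual items.
--
--     Raises:
--         ValueError: If quotes are unbalanced.
--     """
--     if not value or not value.strip():
--         return []
--
--     # Check if it contains quoted strings (multiline hooks style)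
--     if '"' in value:
--         items = []
--         current = ""
--         in_quotes = False
--         i = 0
--         while i < len(value):
--             char = value[i]
--
--             # Handle escape sequences inside quotes
--             if in_quotes and char == "\\" and i + 1 < len(value):
--                 next_char = value[i + 1]
--                 if next_char in ('"', "\\"):
--                     current += next_char
--                     i += 2
--                     continue
--
--             if char == '"':
--                 in_quotes = not in_quotes
--                 if not in_quotes and current.strip():
--                     items.append(current.strip())
--                     current = ""
--             elif in_quotes:
--                 current += char
--             i += 1
--
--         # Check for unbalanced quotes
--         if in_quotes:
--             raise ValueError(f"Unbalanced quotes in value: {value}")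
--
--         return items
--
--     # Simple space-separated list
--     return value.split()
-- ===== SOURCE B (Python) =====
-- def _read_quoted(s, j):
--     """Read a quoted body of s starting just after an opening quote at j-1.
--
--     Returns (unescaped body, remainder after the closing quote).
--     Only \" and \\ are unescaped; a lone backslash stays literal.
--     """
--     out = []
--     while j < len(s):
--         c = s[j]
--         if c == '"':
--             return "".join(out), s[j + 1:]
--         if c == "\\" and j + 1 < len(s) and s[j + 1] in ('"', "\\"):
--             out.append(s[j + 1])
--             j += 2
--         else:
--             out.append(c)
--             j += 1
--     raise ValueError(f"Unbalanced quotes in value: {s}")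
--
--
-- def parse_multiline_value(value: str) -> list[str]:
--     """Parse a multiline or space-separated value into a list."""
--     if not value.strip():
--         return []
--     if '"' not in value:
--         return value.split()
--     items = []
--     rest = value
--     while True:
--         pos = rest.find('"')
--         if pos == -1:
--             return items
--         body, rest = _read_quoted(rest, pos + 1)
--         body = body.strip()
--         if body:
--             items.append(body)
-- ===== Notes on version B (the rewrite author's own statement) =====
-- stated objective: alternative
-- what changed: A's single character-by-character state machine with an in_quotes flag is replaced by a find-next-quote outer loop plus a _read_quoted helper that reads one quoted body (unescaping \" and \\) at a time; Pre_ excludes unbalanced-quote inputs, on which both A and B raise ValueError.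
import Mathlib
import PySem

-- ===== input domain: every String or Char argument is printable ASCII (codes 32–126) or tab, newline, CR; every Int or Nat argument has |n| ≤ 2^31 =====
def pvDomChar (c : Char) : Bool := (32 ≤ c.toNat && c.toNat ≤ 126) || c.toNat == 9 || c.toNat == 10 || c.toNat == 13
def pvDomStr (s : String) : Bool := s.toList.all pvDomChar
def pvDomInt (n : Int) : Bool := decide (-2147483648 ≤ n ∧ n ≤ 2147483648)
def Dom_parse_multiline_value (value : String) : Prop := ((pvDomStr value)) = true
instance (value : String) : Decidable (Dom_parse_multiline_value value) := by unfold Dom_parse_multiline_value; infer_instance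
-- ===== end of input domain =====

-- B replaces A's single-pass in_quotes state machine by a find-next-quote /
-- read-one-quoted-segment decomposition (objective: alternative, same cost).

-- ===== PORT A =====
-- A's while loop: state = (remaining chars, in_quotes, current, items); none = ValueError
def pmvLoopA : List Char → Bool → List Char → List (List Char) → Option (List (List Char))
  | [], inq, _, items => if inq then none else some items
  | '\\' :: n :: rest, true, cur, items =>
      -- escape sequence inside quotes (the i + 1 < len(value) guard is the n :: rest pattern)
      if n = '"' ∨ n = '\\' then pmvLoopA rest true (cur ++ [n]) items
      else pmvLoopA (n :: rest) true (cur ++ ['\\']) items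
  | c :: rest, inq, cur, items =>
      if c = '"' then
        let inq' := !inq
        if inq' = false ∧ PySem.Chars.strip cur ≠ [] then
          pmvLoopA rest inq' [] (items ++ [PySem.Chars.strip cur])
        else pmvLoopA rest inq' cur items
      else if inq then pmvLoopA rest inq (cur ++ [c]) items
      else pmvLoopA rest inq cur items

def parse_multiline_value (value : String) : List String :=
  if value = "" ∨ PySem.Str.strip value = "" then []
  else if PySem.Str.isIn "\"" value then
    ((pmvLoopA value.toList false [] []).getD []).map String.ofList
  else PySem.Str.split₀ value

-- ===== PORT B =====
-- _read_quoted: read one quoted body (unescaping \" and \\), return (body, remainder); none = ValueError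
def pmvReadQ : List Char → List Char → Option (List Char × List Char)
  | [], _ => none
  | '"' :: rest, acc => some (acc, rest)
  | '\\' :: n :: rest, acc =>
      if n = '"' ∨ n = '\\' then pmvReadQ rest (acc ++ [n])
      else pmvReadQ (n :: rest) (acc ++ ['\\'])
  | c :: rest, acc => pmvReadQ rest (acc ++ [c])

-- needed by pmvSegs's termination proof
theorem pmvReadQ_len : ∀ (cs acc : List Char) (b r : List Char),
    pmvReadQ cs acc = some (b, r) → r.length < cs.length := by
  intro cs acc b r h
  induction cs, acc using pmvReadQ.induct generalizing b r with
  | case1 => simp [pmvReadQ] at h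
  | case2 rest acc => simp [pmvReadQ] at h; simp [← h.2]
  | case3 n rest acc hn ih =>
      rw [pmvReadQ, if_pos hn] at h
      have := ih _ _ h
      simp only [List.length_cons]; omega
  | case4 n rest acc hn ih =>
      rw [pmvReadQ, if_neg hn] at h
      have := ih _ _ h
      simp only [List.length_cons] at this ⊢; omega
  | case5 c rest acc h1 h2 ih =>
      rw [pmvReadQ.eq_def] at h
      split at h
      · simp at h
      · exfalso; rename_i hx; injection hx with e1 _; exact h1 e1
      · exfalso; rename_i hx; injection hx with e1 e2; exact h2 _ _ e1 e2
      · rename_i hx; injection hx with e1 e2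
        subst e1; subst e2
        have := ih _ _ h
        simp only [List.length_cons]; omega

-- B's outer loop: repeatedly find the next '"', read the quoted body, strip, collect
def pmvSegs (cs : List Char) (items : List (List Char)) : Option (List (List Char)) :=
  match h : cs.dropWhile (· ≠ '"') with
  | [] => some items
  | _ :: rest =>
    match h2 : pmvReadQ rest [] with
    | none => none
    | some (b, rest') =>
      let s := PySem.Chars.strip b
      if s ≠ [] then pmvSegs rest' (items ++ [s]) else pmvSegs rest' items
termination_by cs.length
decreasing_by
  all_goals
    have h1 : (cs.dropWhile (· ≠ '"')).length ≤ cs.length := List.length_dropWhile_le _ _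
    rw [h] at h1
    have h3 := pmvReadQ_len _ _ _ _ h2
    simp at h1
    omega

def parse_multiline_value_alt (value : String) : List String :=
  if PySem.Str.strip value = "" then []
  else if PySem.Str.isIn "\"" value then
    ((pmvSegs value.toList []).getD []).map String.ofList
  else PySem.Str.split₀ value

-- ===== PRECONDITION & SPEC =====
-- Pre_ excludes exactly the inputs on which A raises ValueError ("Unbalanced quotes in value"):
-- the balanced-quote condition of the INI syntax itself (quotes toggle; \" and \\ are escapes
-- inside quotes). It is a one-Bool-state descent over the input string — the syntactic
-- well-formedness condition a reader checks on the input, shared by both programs, not a copy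
-- of either port (it carries no current/items state and computes no output).
def pmvBalanced : List Char → Bool → Bool
  | [], inq => !inq
  | '\\' :: n :: rest, true =>
      if n = '"' ∨ n = '\\' then pmvBalanced rest true
      else pmvBalanced (n :: rest) true
  | c :: rest, inq => if c = '"' then pmvBalanced rest (!inq) else pmvBalanced rest inq

def Pre_parse_multiline_value (value : String) : Prop := pmvBalanced value.toList false = true
instance (value : String) : Decidable (Pre_parse_multiline_value value) := by
  unfold Pre_parse_multiline_value; infer_instance

def pvWitness_parse_multiline_value : String := "\"first cmd\" \"echo \\\"hi\\\"\" x"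

def Spec_parse_multiline_value (value : String) (out : List String) : Prop := out = parse_multiline_value_alt value
instance (value : String) (out : List String) : Decidable (Spec_parse_multiline_value value out) := by unfold Spec_parse_multiline_value; infer_instance

-- ===== CLAIM (what is proved, stated in full; the proofs are below) =====
def Claim_equal_parse_multiline_value : Prop := ∀ (value : String), Dom_parse_multiline_value value → Pre_parse_multiline_value value → Spec_parse_multiline_value value (parse_multiline_value value)

-- ===== LEMMAS AND PROOFS =====

-- unfolding lemmas for pmvSegs
theorem pmvSegs_nil (items : List (List Char)) : pmvSegs [] items = some items := by
  rw [pmvSegs.eq_def]; simp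

theorem pmvSegs_cons (c : Char) (rest : List Char) (items : List (List Char)) (hc : c ≠ '"') :
    pmvSegs (c :: rest) items = pmvSegs rest items := by
  have hd : (c :: rest).dropWhile (· ≠ '"') = rest.dropWhile (· ≠ '"') := by
    simp [hc]
  rw [pmvSegs.eq_def, pmvSegs.eq_def]
  rw [hd]

theorem pmvSegs_quote (rest : List Char) (items : List (List Char)) :
    pmvSegs ('"' :: rest) items =
      match pmvReadQ rest [] with
      | none => none
      | some (b, rest') =>
        if PySem.Chars.strip b ≠ [] then pmvSegs rest' (items ++ [PySem.Chars.strip b])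
        else pmvSegs rest' items := by
  have hd : ('"' :: rest).dropWhile (· ≠ '"') = '"' :: rest := by
    simp
  conv_lhs => rw [pmvSegs.eq_def]
  rw [hd]
  split
  · rename_i heq; exact absurd heq (by simp)
  · rename_i head rest1 heq
    injection heq with e1 e2
    subst e2
    cases hr : pmvReadQ rest [] with
    | none => rfl
    | some p => rfl

-- unfolding lemmas for pmvLoopA
theorem pmvLoopA_nil (inq : Bool) (cur : List Char) (items : List (List Char)) :
    pmvLoopA [] inq cur items = if inq then none else some items := by
  rw [pmvLoopA]

theorem pmvLoopA_false (c : Char) (rest cur : List Char) (items : List (List Char)) :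
    pmvLoopA (c :: rest) false cur items =
      if c = '"' then pmvLoopA rest true cur items else pmvLoopA rest false cur items := by
  rw [pmvLoopA.eq_def]
  split
  · rename_i hx; exact absurd hx (by simp)
  · rename_i hx _; exfalso; injection hx with _ _; simp_all
  · rename_i heq hno; injection heq with e1 e2
    subst e1; subst e2
    by_cases hcq : c = '"'
    · simp [hcq]
    · simp [hcq]

theorem pmvLoopA_true (c : Char) (rest cur : List Char) (items : List (List Char))
    (hc : c ≠ '\\' ∨ rest = []) :
    pmvLoopA (c :: rest) true cur items =
      if c = '"' then
        (if PySem.Chars.strip cur ≠ [] then pmvLoopA rest false [] (items ++ [PySem.Chars.strip cur])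
         else pmvLoopA rest false cur items)
      else pmvLoopA rest true (cur ++ [c]) items := by
  rw [pmvLoopA.eq_def]
  split
  · rename_i hx; exact absurd hx (by simp)
  · rename_i n r hx _
    exfalso
    injection hx with e1 e2
    rcases hc with hc | hc
    · exact hc e1
    · rw [hc] at e2; cases e2
  · rename_i heq hno; injection heq with e1 e2
    subst e1; subst e2
    by_cases hcq : c = '"'
    · simp [hcq]
    · simp [hcq]

-- generic step of pmvReadQ
theorem pmvReadQ_gen (c : Char) (rest acc : List Char)
    (h1 : c = '"' → False) (h2 : ∀ (n : Char) (r1 : List Char), c = '\\' → rest = n :: r1 → False) :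
    pmvReadQ (c :: rest) acc = pmvReadQ rest (acc ++ [c]) := by
  rw [pmvReadQ.eq_def]
  split
  · rename_i hx; exact absurd hx (by simp)
  · rename_i hx; exfalso; injection hx with e1 _; exact h1 e1
  · rename_i hx; exfalso; injection hx with e1 e2; exact h2 _ _ e1 e2
  · rename_i hx; injection hx with e1 e2; subst e1; subst e2; rfl

-- the accumulator of pmvReadQ is a prefix of the result
theorem pmvReadQ_append : ∀ (cs acc acc1 : List Char),
    pmvReadQ cs (acc1 ++ acc) = Option.map (fun p => (acc1 ++ p.1, p.2)) (pmvReadQ cs acc) := by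
  intro cs acc
  induction cs, acc using pmvReadQ.induct with
  | case1 acc => intro acc1; simp [pmvReadQ]
  | case2 rest acc => intro acc1; simp [pmvReadQ]
  | case3 n rest acc hn ih =>
      intro acc1
      rw [pmvReadQ, if_pos hn, List.append_assoc, ih]
      rw [pmvReadQ, if_pos hn]
  | case4 n rest acc hn ih =>
      intro acc1
      rw [pmvReadQ, if_neg hn, List.append_assoc, ih]
      rw [pmvReadQ, if_neg hn]
  | case5 c rest acc h1 h2 ih =>
      intro acc1
      rw [pmvReadQ_gen c rest _ h1 h2, List.append_assoc, ih]
      rw [pmvReadQ_gen c rest _ h1 h2]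

-- strip facts
theorem pmv_strip_eq_nil_all (w : List Char) (h : PySem.Chars.strip w = []) :
    w.all PySem.Chars.isspace = true := by
  simp only [PySem.Chars.strip, PySem.Chars.rstrip, PySem.Chars.lstrip] at h
  rw [List.reverse_eq_nil_iff, List.dropWhile_eq_nil_iff] at h
  simp only [List.mem_reverse] at h
  rw [List.all_eq_true]
  intro x hx
  rcases List.mem_append.mp ((List.takeWhile_append_dropWhile
      (p := PySem.Chars.isspace) (l := w)) ▸ hx) with h1 | h1
  · exact List.mem_takeWhile_imp h1
  · exact h x h1

theorem pmv_strip_append_ws (w b : List Char) (h : w.all PySem.Chars.isspace = true) :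
    PySem.Chars.strip (w ++ b) = PySem.Chars.strip b := by
  have hw : w.dropWhile PySem.Chars.isspace = [] := by
    rw [List.dropWhile_eq_nil_iff]
    intro x hx
    exact (List.all_eq_true.mp h) x hx
  simp only [PySem.Chars.strip, PySem.Chars.lstrip, List.dropWhile_append, hw]
  simp

-- A's loop inside quotes is B's _read_quoted
theorem pmvLoopA_true_readQ : ∀ (cs cur : List Char) (items : List (List Char)),
    pmvLoopA cs true cur items =
      match pmvReadQ cs cur with
      | none => none
      | some (b, r) =>
        if PySem.Chars.strip b ≠ [] then pmvLoopA r false [] (items ++ [PySem.Chars.strip b])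
        else pmvLoopA r false b items := by
  intro cs cur items
  induction cs, cur using pmvReadQ.induct generalizing items with
  | case1 cur => rw [pmvLoopA_nil]; simp [pmvReadQ]
  | case2 rest acc =>
      rw [pmvLoopA_true '"' rest acc items (Or.inl (by decide)), if_pos rfl]
      rw [pmvReadQ]
  | case3 n rest acc hn ih =>
      rw [pmvLoopA, if_pos hn, ih]
      rw [pmvReadQ, if_pos hn]
  | case4 n rest acc hn ih =>
      rw [pmvLoopA, if_neg hn, ih]
      rw [pmvReadQ, if_neg hn]
  | case5 c rest acc h1 h2 ih =>
      have hc : c ≠ '\\' ∨ rest = [] := by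
        by_cases hb : c = '\\'
        · right
          cases rest with
          | nil => rfl
          | cons n r1 => exact absurd rfl (h2 n r1 hb)
        · exact Or.inl hb
      rw [pmvLoopA_true c rest acc items hc, if_neg (fun e => h1 e), ih]
      rw [pmvReadQ_gen c rest acc h1 h2]

-- main invariant: outside quotes with an all-whitespace current, A's loop is B's segment loop
theorem pmvLoopA_false_segs : ∀ (n : Nat) (cs : List Char), cs.length ≤ n →
    ∀ (cur : List Char) (items : List (List Char)), cur.all PySem.Chars.isspace = true →
    pmvLoopA cs false cur items = pmvSegs cs items := by
  intro n
  induction n with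
  | zero =>
      intro cs hlen cur items hws
      rw [List.length_eq_zero_iff.mp (Nat.le_zero.mp hlen)]
      rw [pmvLoopA_nil, pmvSegs_nil]
      rfl
  | succ n ih =>
      intro cs hlen cur items hws
      match cs with
      | [] => rw [pmvLoopA_nil, pmvSegs_nil]; rfl
      | c :: rest =>
        by_cases hc : c = '"'
        · subst hc
          rw [pmvLoopA_false, if_pos rfl, pmvLoopA_true_readQ, pmvSegs_quote]
          have hacc := pmvReadQ_append rest [] cur
          simp only [List.append_nil] at hacc
          cases hr : pmvReadQ rest [] with
          | none => rw [hr] at hacc; rw [hacc]; rfl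
          | some p =>
            obtain ⟨b0, r⟩ := p
            rw [hr] at hacc
            simp only [Option.map_some] at hacc
            rw [hacc]
            show (if PySem.Chars.strip (cur ++ b0) ≠ [] then
                    pmvLoopA r false [] (items ++ [PySem.Chars.strip (cur ++ b0)])
                  else pmvLoopA r false (cur ++ b0) items) =
                 (if PySem.Chars.strip b0 ≠ [] then pmvSegs r (items ++ [PySem.Chars.strip b0])
                  else pmvSegs r items)
            have hstr : PySem.Chars.strip (cur ++ b0) = PySem.Chars.strip b0 :=
              pmv_strip_append_ws cur b0 hws
            rw [hstr]
            have hrlen : r.length ≤ n := by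
              have := pmvReadQ_len rest [] b0 r hr
              simp only [List.length_cons] at hlen
              omega
            by_cases hb : PySem.Chars.strip b0 ≠ []
            · rw [if_pos hb, if_pos hb]
              exact ih r hrlen [] _ rfl
            · rw [if_neg hb, if_neg hb]
              have hws2 : (cur ++ b0).all PySem.Chars.isspace = true := by
                apply pmv_strip_eq_nil_all
                rw [hstr]
                exact not_not.mp (fun hh => hb hh)
              exact ih r hrlen (cur ++ b0) items hws2
        · rw [pmvLoopA_false, if_neg hc, pmvSegs_cons c rest items hc]
          exact ih rest (by simp only [List.length_cons] at hlen; omega) cur items hws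

-- ===== VERDICT =====
theorem parse_multiline_value_spec : Claim_equal_parse_multiline_value := by
  intro value hdom hpre
  unfold Spec_parse_multiline_value parse_multiline_value parse_multiline_value_alt
  by_cases h0 : PySem.Str.strip value = ""
  · simp [h0]
  · have hne : ¬(value = "" ∨ PySem.Str.strip value = "") := by
      rintro (h | h)
      · subst h; exact h0 rfl
      · exact h0 h
    rw [if_neg hne, if_neg h0]
    by_cases hq : PySem.Str.isIn "\"" value = true
    · rw [if_pos hq, if_pos hq]
      rw [pmvLoopA_false_segs value.toList.length value.toList le_rfl [] [] rfl]
    · rw [if_neg hq, if_neg hq]
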